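-- pv_equiv track=rewrite | github.com/belovmd/it-academy-python-winter | homework2_task2-2.py | breakchocolate
-- ===== SOURCE A (Python) =====
-- def breakchocolate(n, m):
--     s = n * m
--     q = 0
--     if s > 1:
--         for i in range(1, s):
--             q += 1
--         return q
--     else:
--         return 0
-- ===== SOURCE B (Python) =====
-- def breakchocolate(n, m):
--     return max(n * m - 1, 0)
-- ===== Notes on version B (the rewrite author's own statement) =====
-- stated objective: faster
-- what changed: Replaced the O(n*m) counting loop with the closed form max(n*m-1, 0).
import Mathlib
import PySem

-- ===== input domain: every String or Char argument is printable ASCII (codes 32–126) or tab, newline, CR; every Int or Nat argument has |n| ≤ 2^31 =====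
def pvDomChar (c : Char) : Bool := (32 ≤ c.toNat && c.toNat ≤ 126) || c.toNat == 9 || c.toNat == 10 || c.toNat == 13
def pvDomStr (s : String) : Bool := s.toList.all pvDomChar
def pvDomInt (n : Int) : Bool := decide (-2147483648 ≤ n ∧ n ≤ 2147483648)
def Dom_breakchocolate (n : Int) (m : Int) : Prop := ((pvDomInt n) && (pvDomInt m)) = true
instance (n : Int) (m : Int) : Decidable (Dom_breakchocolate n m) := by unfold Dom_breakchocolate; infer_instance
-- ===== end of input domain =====

-- B replaces A's O(n*m) counting loop with the closed form max(n*m-1, 0).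

-- ===== PORT A =====
def breakchocolate (n : Int) (m : Int) : Int :=
  let s := n * m
  if s > 1 then (PySem.List.pyRange 1 s 1).foldl (fun q _ => q + 1) 0
  else 0

-- ===== PORT B =====
def breakchocolate_alt (n : Int) (m : Int) : Int := max (n * m - 1) 0

-- ===== PRECONDITION & SPEC =====
def Spec_breakchocolate (n : Int) (m : Int) (out : Int) : Prop := out = breakchocolate_alt n m
instance (n : Int) (m : Int) (out : Int) : Decidable (Spec_breakchocolate n m out) := by unfold Spec_breakchocolate; infer_instance

-- ===== CLAIM (what is proved, stated in full; the proofs are below) =====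
def Claim_equal_breakchocolate : Prop := ∀ (n : Int) (m : Int), Dom_breakchocolate n m → Spec_breakchocolate n m (breakchocolate n m)

-- ===== LEMMAS AND PROOFS =====
theorem foldl_count {α : Type} (l : List α) (q : Int) :
    l.foldl (fun q _ => q + 1) q = q + l.length := by
  induction l generalizing q with
  | nil => simp
  | cons a t ih => simp [List.foldl, ih]; omega

-- ===== VERDICT (by name: the statement is the Claim_ definition above) =====
theorem breakchocolate_spec : Claim_equal_breakchocolate := by
  intro n m _
  unfold Spec_breakchocolate breakchocolate breakchocolate_alt
  by_cases h : n * m > 1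
  · simp only [h, if_pos]
    rw [foldl_count, PySem.List.length_pyRange_one]
    omega
  · simp only [h, if_neg, not_false_iff]
    omega
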